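-- pv_equiv track=rewrite | github.com/Nhahan/Programmers | level_1/46. 실패율.py | solution
-- ===== SOURCE A (Python) =====
-- def solution(N, stages):
--     total = len(stages)
--     answer = []
--     for i in range(1, N + 1):
--         if i in stages:
--             answer.append(stages.count(i))
--         total - stages.count(i)
--     return answer
-- ===== SOURCE B (Python) =====
-- def solution(N, stages):
--     return [stages.count(k) for k in sorted(set(stages)) if 1 <= k <= N]
-- ===== Notes on version B (the rewrite author's own statement) =====
-- stated objective: idiomatic
-- what changed: Instead of scanning every candidate 1..N with a linear membership test, B iterates over the sorted distinct stage values (set + sorted) filtered to the 1..N range, mapping each to its count; the per-candidate membership scan disappears.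
import Mathlib
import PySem

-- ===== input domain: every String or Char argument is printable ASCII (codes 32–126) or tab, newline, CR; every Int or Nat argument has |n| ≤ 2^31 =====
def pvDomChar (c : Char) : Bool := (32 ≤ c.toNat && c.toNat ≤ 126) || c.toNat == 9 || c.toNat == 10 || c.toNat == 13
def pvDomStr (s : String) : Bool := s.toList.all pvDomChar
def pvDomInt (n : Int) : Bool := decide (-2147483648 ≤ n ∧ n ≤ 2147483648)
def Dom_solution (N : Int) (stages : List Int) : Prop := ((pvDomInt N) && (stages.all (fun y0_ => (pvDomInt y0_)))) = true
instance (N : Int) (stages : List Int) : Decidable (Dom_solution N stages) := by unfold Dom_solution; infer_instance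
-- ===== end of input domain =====

-- B iterates the sorted distinct stage values restricted to 1..N instead of scanning 1..N with membership tests; same return value.
-- ===== PORT A =====
def solution (N : Int) (stages : List Int) : List Int :=
  let total := (stages.length : Int)
  let answer : List Int := []
  (PySem.List.pyRange 1 (N + 1) 1).foldl
    (fun answer i =>
      let answer := if i ∈ stages then answer ++ [(stages.count i : Int)] else answer
      let _ := total - (stages.count i : Int)   -- dead expression in A, kept literally
      answer)
    answer

-- ===== PORT B =====
def solution_alt (N : Int) (stages : List Int) : List Int :=
  ((PySem.List.sorted (PySem.Set.ofList stages) (fun x => x) false).filter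
      (fun k => decide (1 ≤ k) && decide (k ≤ N))).map
    (fun k => (stages.count k : Int))

-- ===== PRECONDITION & SPEC =====
def Spec_solution (N : Int) (stages : List Int) (out : List Int) : Prop := out = solution_alt N stages
instance (N : Int) (stages : List Int) (out : List Int) : Decidable (Spec_solution N stages out) := by unfold Spec_solution; infer_instance

-- ===== CLAIM (what is proved, stated in full; the proofs are below) =====
def Claim_equal_solution : Prop := ∀ (N : Int) (stages : List Int), Dom_solution N stages → Spec_solution N stages (solution N stages)

-- ===== LEMMAS AND PROOFS =====

-- ===== VERDICT (by name: the statement is the Claim_ definition above) =====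
-- A's loop body (with its dead expression) appends count i exactly when i is present
lemma foldlA_eq (stages : List Int) :
    ∀ (l : List Int) (acc : List Int),
      l.foldl
        (fun answer i =>
          let answer := if i ∈ stages then answer ++ [(stages.count i : Int)] else answer
          let _ := (stages.length : Int) - (stages.count i : Int)
          answer)
        acc =
      acc ++ (l.filter (fun i => decide (i ∈ stages))).map (fun i => (stages.count i : Int)) := by
  intro l
  induction l with
  | nil => intro acc; simp
  | cons x xs ih =>
    intro acc
    simp only [List.foldl_cons, List.filter_cons]
    by_cases hx : x ∈ stages <;> simp [hx, ih, List.append_assoc]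

-- the two strictly increasing lists of in-range present stages coincide
lemma key_lists_eq (N : Int) (stages : List Int) :
    (PySem.List.pyRange 1 (N + 1) 1).filter (fun i => decide (i ∈ stages)) =
    (PySem.List.sorted (PySem.Set.ofList stages) (fun x => x) false).filter
      (fun k => decide (1 ≤ k) && decide (k ≤ N)) := by
  have hperm :
      ((PySem.List.pyRange 1 (N + 1) 1).filter (fun i => decide (i ∈ stages))).Perm
        ((PySem.List.sorted (PySem.Set.ofList stages) (fun x => x) false).filter
          (fun k => decide (1 ≤ k) && decide (k ≤ N))) := by
    rw [List.perm_ext_iff_of_nodup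
      ((PySem.List.nodup_pyRange_one 1 (N+1)).filter _)
      (((PySem.List.sorted_ofList_pairwise_lt stages).nodup).filter _)]
    intro a
    simp [List.mem_filter, PySem.List.mem_pyRange_one, PySem.List.mem_sorted,
      PySem.Set.mem_ofList]
    by_cases h : a ∈ stages <;> simp [h]
  exact hperm.eq_of_pairwise (fun a b _ _ h1 h2 => (lt_asymm h1 h2).elim)
    ((PySem.List.pairwise_lt_pyRange_one 1 (N+1)).filter _)
    ((PySem.List.sorted_ofList_pairwise_lt stages).filter _)

theorem solution_spec : Claim_equal_solution := by
  intro N stages _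
  unfold Spec_solution solution solution_alt
  rw [foldlA_eq stages (PySem.List.pyRange 1 (N + 1) 1) [], List.nil_append, key_lists_eq]
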